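-- pv_equiv track=rewrite | github.com/Muhammad-Ahmed-Qazi/DSA-CS218 | Lab 13/Exercises/ex_01.py | HeapInsertion
-- ===== SOURCE A (Python) =====
-- def HeapInsertion(array, value):
--     array.append(value)
--     index = len(array) - 1
--     while index > 0:
--         parent_index = (index - 1) // 2
--         if array[parent_index] < array[index]:
--             array[parent_index], array[index] = array[index], array[parent_index]
--             index = parent_index
--         else:
--             break
--     return array
-- ===== SOURCE B (Python) =====
-- def HeapInsertion(array, value):
--     array.append(value)
--     # Stage 1: precompute the ancestor path of the new slot, leaf to root.
--     path = []
--     i = len(array) - 1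
--     while i > 0:
--         path.append(i)
--         i = (i - 1) // 2
--     path.append(0)
--     # Stage 2: read-only scan of the path to find how many levels the value rises.
--     rise = 0
--     while rise + 1 < len(path) and array[path[rise + 1]] < value:
--         rise += 1
--     # Stage 3: shift those ancestors down one level, then place the value once.
--     for k in range(rise):
--         array[path[k]] = array[path[k + 1]]
--     array[path[rise]] = value
--     return array
-- ===== Notes on version B (the rewrite author's own statement) =====
-- stated objective: alternative
-- what changed: Replaces the interleaved compare-and-swap sift-up loop with three staged passes: precompute the ancestor path of the new slot, a read-only scan of that path to count how many levels the value rises, then a shift pass that moves those ancestors down one level and writes the value once.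
import Mathlib
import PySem

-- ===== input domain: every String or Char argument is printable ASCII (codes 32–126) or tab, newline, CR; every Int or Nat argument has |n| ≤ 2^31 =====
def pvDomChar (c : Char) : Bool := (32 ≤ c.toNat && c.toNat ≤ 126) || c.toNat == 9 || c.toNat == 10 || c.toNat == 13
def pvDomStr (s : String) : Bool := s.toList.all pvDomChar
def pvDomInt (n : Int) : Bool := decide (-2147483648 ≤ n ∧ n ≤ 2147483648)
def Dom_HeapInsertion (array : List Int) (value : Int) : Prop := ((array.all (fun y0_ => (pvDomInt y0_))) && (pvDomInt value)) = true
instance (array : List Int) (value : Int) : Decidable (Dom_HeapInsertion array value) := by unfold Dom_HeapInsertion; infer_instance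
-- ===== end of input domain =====

-- B replaces the one-pass swap sift-up with three staged passes (precompute the ancestor
-- path, read-only scan for the rise count, then shift and place); both mutate `array` the
-- same way in Python, equivalence proved on return values.


-- ===== PORT A =====
-- A's while loop: swap parent/child while parent < child; index strictly decreases.
def siftSwap (xs : List Int) (i : Nat) : List Int :=
  if h : 0 < i then
    let p := (i - 1) / 2
    if xs.getD p 0 < xs.getD i 0 then
      siftSwap ((xs.set p (xs.getD i 0)).set i (xs.getD p 0)) p
    else xs
  else xs
termination_by i
decreasing_by omega

def HeapInsertion (array : List Int) (value : Int) : List Int :=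
  -- array.append(value); index = len(array) - 1 (indices are in range, so getD is exact)
  siftSwap (array ++ [value]) array.length

-- ===== PORT B =====
-- Stage 1: the ancestor path of the new slot, leaf to root.
def buildPath (i : Nat) : List Nat :=
  if h : 0 < i then i :: buildPath ((i - 1) / 2) else [0]
termination_by i
decreasing_by omega

-- Stage 2: while rise+1 < len(path) and array[path[rise+1]] < value: rise += 1
def countRise (xs : List Int) (path : List Nat) (val : Int) : Nat :=
  match path with
  | _ :: b :: rest => if xs.getD b 0 < val then countRise xs (b :: rest) val + 1 else 0
  | _ => 0

-- Stage 3: for k in range(rise): array[path[k]] = array[path[k+1]]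
def shiftDown (xs : List Int) (path : List Nat) (r : Nat) : List Int :=
  match r, path with
  | r' + 1, a :: b :: rest => shiftDown (xs.set a (xs.getD b 0)) (b :: rest) r'
  | _, _ => xs

def HeapInsertion_alt (array : List Int) (value : Int) : List Int :=
  let ys := array ++ [value]
  let path := buildPath array.length
  let r := countRise ys path value
  (shiftDown ys path r).set (path.getD r 0) value

-- ===== PRECONDITION & SPEC =====
def Spec_HeapInsertion (array : List Int) (value : Int) (out : List Int) : Prop := out = HeapInsertion_alt array value
instance (array : List Int) (value : Int) (out : List Int) : Decidable (Spec_HeapInsertion array value out) := by unfold Spec_HeapInsertion; infer_instance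

-- ===== CLAIM (what is proved, stated in full; the proofs are below) =====
def Claim_equal_HeapInsertion : Prop := ∀ (array : List Int) (value : Int), Dom_HeapInsertion array value → Spec_HeapInsertion array value (HeapInsertion array value)

-- ===== LEMMAS AND PROOFS =====

theorem getD_set_ne (xs : List Int) (i j : Nat) (a : Int) (h : i ≠ j) :
    (xs.set i a).getD j 0 = xs.getD j 0 := by
  simp [List.getD, List.getElem?_set_ne h]

theorem set_getD_self (xs : List Int) (i : Nat) (h : i < xs.length) :
    xs.set i (xs.getD i 0) = xs := by
  apply List.ext_getElem? ; intro j
  by_cases hj : i = j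
  · subst hj; simp [List.getD, List.getElem?_eq_getElem h]
  · simp [List.getElem?_set_ne hj]

theorem buildPath_head (p : Nat) : ∃ rest, buildPath p = p :: rest := by
  by_cases h : 0 < p
  · exact ⟨buildPath ((p - 1) / 2), by rw [buildPath]; simp [h]⟩
  · have hp0 : p = 0 := by omega
    subst hp0
    exact ⟨[], by rw [buildPath]; simp⟩

theorem mem_buildPath_le (i : Nat) : ∀ j ∈ buildPath i, j ≤ i := by
  induction i using Nat.strong_induction_on with
  | _ i ih =>
    intro j hj
    rw [buildPath] at hj
    by_cases h : 0 < i
    · simp [h] at hj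
      rcases hj with hj | hj
      · omega
      · have := ih ((i - 1) / 2) (by omega) j hj; omega
    · simp [h] at hj; omega

theorem countRise_set_notmem (xs : List Int) (path : List Nat) (val : Int) (i : Nat) (a : Int)
    (h : i ∉ path) : countRise (xs.set i a) path val = countRise xs path val := by
  induction path with
  | nil => rfl
  | cons c rest ih =>
    cases rest with
    | nil => rfl
    | cons b rest' =>
      have hb : i ≠ b := by intro e; exact h (by simp [e])
      have htail : i ∉ b :: rest' := by intro e; exact h (List.mem_cons_of_mem _ e)
      simp only [countRise, getD_set_ne xs i b a hb, ih htail]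

-- Core invariant: A's sift-up from `ys` with `val` placed at `i` equals B's staged passes.
theorem sift_eq (i : Nat) : ∀ (ys : List Int) (val : Int), i < ys.length →
    siftSwap (ys.set i val) i =
      (shiftDown ys (buildPath i) (countRise ys (buildPath i) val)).set
        ((buildPath i).getD (countRise ys (buildPath i) val) 0) val := by
  induction i using Nat.strong_induction_on with
  | _ i ih =>
    intro ys val hi
    by_cases h0 : 0 < i
    · set p := (i - 1) / 2 with hp
      obtain ⟨rest, hpath⟩ := buildPath_head p
      have hbuild : buildPath i = i :: p :: rest := by rw [buildPath]; simp [h0, ← hp, hpath]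
      have hpi : p ≠ i := by omega
      have hgp : (ys.set i val).getD p 0 = ys.getD p 0 := getD_set_ne ys i p val hpi.symm
      have hgi : (ys.set i val).getD i 0 = val := by simp [List.getD, hi]
      rw [siftSwap]
      simp only [h0, dif_pos, ← hp, hgp, hgi]
      by_cases hc : ys.getD p 0 < val
      · simp only [hc, if_pos]
        have key : ((ys.set i val).set p val).set i (ys.getD p 0)
            = (ys.set i (ys.getD p 0)).set p val := by
          rw [List.set_comm val val hpi.symm, List.set_set]
          exact List.set_comm val (ys.getD p 0) hpi
        rw [key]
        have hlen : p < (ys.set i (ys.getD p 0)).length := by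
          simp; omega
        rw [ih p (by omega) (ys.set i (ys.getD p 0)) val hlen]
        have hnot : i ∉ buildPath p := fun hm => by
          have := mem_buildPath_le p i hm; omega
        have hcr : countRise (ys.set i (ys.getD p 0)) (buildPath p) val
            = countRise ys (buildPath p) val :=
          countRise_set_notmem ys (buildPath p) val i (ys.getD p 0) hnot
        have hcri : countRise ys (buildPath i) val = countRise ys (buildPath p) val + 1 := by
          rw [hbuild]; simp only [countRise, ← hpath]; rw [if_pos]; simpa [List.getD] using hc
        have hshift : shiftDown ys (buildPath i) (countRise ys (buildPath i) val)
            = shiftDown (ys.set i (ys.getD p 0)) (buildPath p) (countRise ys (buildPath p) val) := by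
          rw [hcri, hbuild, hpath]
          simp [shiftDown, ← hpath]

        have hgetd : (buildPath i).getD (countRise ys (buildPath i) val) 0
            = (buildPath p).getD (countRise ys (buildPath p) val) 0 := by
          rw [hcri, hbuild, hpath]; simp [List.getD]
        rw [hcr, hshift, hgetd]
      · simp only [hc, if_neg, not_false_iff]
        have hcri : countRise ys (buildPath i) val = 0 := by
          rw [hbuild]; simp only [countRise]; rw [if_neg]; simpa [List.getD] using hc
        rw [hcri, hbuild]
        simp [shiftDown]
    · have hi0 : i = 0 := by omega
      subst hi0
      rw [siftSwap]
      simp [buildPath, countRise, shiftDown]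

-- ===== VERDICT (by name: the statement is the Claim_ definition above) =====
theorem HeapInsertion_spec : Claim_equal_HeapInsertion := by
  intro array value _
  unfold Spec_HeapInsertion HeapInsertion HeapInsertion_alt
  have hlen : array.length < (array ++ [value]).length := by simp
  have hset : (array ++ [value]).set array.length value = array ++ [value] := by
    have hv : (array ++ [value]).getD array.length 0 = value := by simp [List.getD]
    calc (array ++ [value]).set array.length value
        = (array ++ [value]).set array.length ((array ++ [value]).getD array.length 0) := by rw [hv]
      _ = array ++ [value] := set_getD_self _ _ hlen
  rw [← sift_eq array.length (array ++ [value]) value hlen, hset]
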